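-- pv_equiv track=rewrite | github.com/amooh-c/GoldCinema-website | app.py | calculate_amount
-- ===== SOURCE A (Python) =====
-- PRICING = {
--     "VIP": {"rows": ["A", "B"], "price": 1200},
--     "REGULAR": {"rows": ["C", "D", "E", "F"], "price": 700},
--     "ECONOMY": {"rows": ["G", "H"], "price": 350}
-- }
--
-- def calculate_amount(seats):
--     """Calculate total amount based on seat rows"""
--     amount = 0
--     for seat in seats:
--         row = seat[0].upper()
--         for data in PRICING.values():
--             if row in data["rows"]:
--                 amount += data["price"]
--                 break
--     return amount
-- ===== SOURCE B (Python) =====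
-- PRICING = {
--     "VIP": {"rows": ["A", "B"], "price": 1200},
--     "REGULAR": {"rows": ["C", "D", "E", "F"], "price": 700},
--     "ECONOMY": {"rows": ["G", "H"], "price": 350}
-- }
--
-- ROW_PRICE = {}
-- for _data in PRICING.values():
--     for _row in _data["rows"]:
--         ROW_PRICE[_row] = _data["price"]
--
-- def calculate_amount(seats):
--     """Calculate total amount based on seat rows"""
--     return sum(ROW_PRICE.get(seat[0].upper(), 0) for seat in seats)
-- ===== Notes on version B (the rewrite author's own statement) =====
-- stated objective: simpler
-- what changed: B precomputes a flat row->price dict once from PRICING and totals with a single sum over seats using .get(row, 0), replacing A's per-seat inner scan over the categories with break.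
import Mathlib
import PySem

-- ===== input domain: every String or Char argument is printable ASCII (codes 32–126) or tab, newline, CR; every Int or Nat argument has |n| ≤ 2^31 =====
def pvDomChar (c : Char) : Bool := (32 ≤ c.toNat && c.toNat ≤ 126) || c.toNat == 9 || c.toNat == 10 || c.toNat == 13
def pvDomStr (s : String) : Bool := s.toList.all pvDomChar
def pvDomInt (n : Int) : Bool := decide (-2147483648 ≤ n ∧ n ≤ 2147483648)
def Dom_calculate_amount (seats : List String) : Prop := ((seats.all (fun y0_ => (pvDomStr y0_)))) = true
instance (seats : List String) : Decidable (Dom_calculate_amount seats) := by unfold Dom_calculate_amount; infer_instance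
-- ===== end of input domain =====

-- B precomputes a flat row->price lookup table and totals seats in one sum, replacing A's per-seat scan over categories; objective: simpler.


-- ===== PORT A =====
-- PRICING: category → (rows, price); rows are single-letter strings, ported as Chars
def pvPRICING : List (List Char × Int) :=
  [(['A', 'B'], 1200), (['C', 'D', 'E', 'F'], 700), (['G', 'H'], 350)]

-- A's inner 'for data in PRICING.values(): if row in data["rows"]: amount += price; break'
def pvScan (row : Char) : List (List Char × Int) → Int
  | [] => 0
  | (rows, price) :: rest => if row ∈ rows then price else pvScan row rest

def calculate_amount (seats : List String) : Int :=
  seats.foldl (fun amount seat =>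
    match PySem.Str.pyGet? seat 0 with      -- seat[0]: none = IndexError, excluded by Pre_
    | none => amount
    | some c => amount + pvScan (PySem.Chars.upperChar c) pvPRICING) 0

-- ===== PORT B =====
-- ROW_PRICE built once by iterating PRICING
def pvRowPrice : PySem.Dict Char Int :=
  pvPRICING.foldl (fun d p => p.1.foldl (fun d r => d.insert r p.2) d) PySem.Dict.empty

def calculate_amount_alt (seats : List String) : Int :=
  (seats.map (fun seat =>
    match PySem.Str.pyGet? seat 0 with      -- seat[0]: raises on "" just like A, excluded by Pre_
    | none => 0
    | some c => pvRowPrice.getD (PySem.Chars.upperChar c) 0)).sum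

-- ===== PRECONDITION & SPEC =====
-- Pre_ excludes only inputs where A (and B) raise IndexError: an empty-string seat, seat[0].
def Pre_calculate_amount (seats : List String) : Prop := ∀ s ∈ seats, s ≠ ""
instance (seats : List String) : Decidable (Pre_calculate_amount seats) := by unfold Pre_calculate_amount; infer_instance
def pvWitness_calculate_amount : List String := ["A1", "g7", "x2"]

def Spec_calculate_amount (seats : List String) (out : Int) : Prop := out = calculate_amount_alt seats
instance (seats : List String) (out : Int) : Decidable (Spec_calculate_amount seats out) := by unfold Spec_calculate_amount; infer_instance

-- ===== CLAIM (what is proved, stated in full; the proofs are below) =====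
def Claim_equal_calculate_amount : Prop := ∀ (seats : List String), Dom_calculate_amount seats → Pre_calculate_amount seats → Spec_calculate_amount seats (calculate_amount seats)

-- ===== LEMMAS AND PROOFS =====
-- per-seat addend: A's first-match scan equals B's table lookup, for every row char
lemma scan_eq_getD (c : Char) : pvScan c pvPRICING = pvRowPrice.getD c 0 := by
  have h : pvRowPrice = PySem.Dict.mk
      [('A', 1200), ('B', 1200), ('C', 700), ('D', 700), ('E', 700), ('F', 700),
       ('G', 350), ('H', 350)] := by decide
  rw [h]
  simp only [pvScan, pvPRICING, PySem.Dict.getD_eq_get?_getD, PySem.Dict.get?_mk_cons,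
    List.mem_cons, List.not_mem_nil, or_false]
  by_cases hA : c = 'A' <;> by_cases hB : c = 'B' <;> by_cases hC : c = 'C' <;>
    by_cases hD : c = 'D' <;> by_cases hE : c = 'E' <;> by_cases hF : c = 'F' <;>
    by_cases hG : c = 'G' <;> by_cases hH : c = 'H' <;>
    subst_eqs <;> simp_all
  simp [PySem.Dict.get?, Ne.symm hA, Ne.symm hB, Ne.symm hC, Ne.symm hD, Ne.symm hE,
    Ne.symm hF, Ne.symm hG, Ne.symm hH]

lemma addend_eq (seat : String) :
    (match PySem.Str.pyGet? seat 0 with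
      | none => (0 : Int)
      | some c => pvScan (PySem.Chars.upperChar c) pvPRICING) =
    (match PySem.Str.pyGet? seat 0 with
      | none => (0 : Int)
      | some c => pvRowPrice.getD (PySem.Chars.upperChar c) 0) := by
  cases PySem.Str.pyGet? seat 0 with
  | none => rfl
  | some c => exact scan_eq_getD _

-- ===== VERDICT (by name: the statement is the Claim_ definition above) =====
theorem calculate_amount_spec : Claim_equal_calculate_amount := by
  intro seats _ _
  unfold Spec_calculate_amount calculate_amount calculate_amount_alt
  have hstep : ∀ (amount : Int) (seat : String),
      (match PySem.Str.pyGet? seat 0 with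
        | none => amount
        | some c => amount + pvScan (PySem.Chars.upperChar c) pvPRICING) =
      amount + (match PySem.Str.pyGet? seat 0 with
        | none => (0 : Int)
        | some c => pvRowPrice.getD (PySem.Chars.upperChar c) 0) := by
    intro amount seat
    rw [← addend_eq seat]
    cases PySem.Str.pyGet? seat 0 <;> simp
  have hfun : (fun (amount : Int) (seat : String) =>
      match PySem.Str.pyGet? seat 0 with
      | none => amount
      | some c => amount + pvScan (PySem.Chars.upperChar c) pvPRICING) =
      (fun (amount : Int) (seat : String) =>
        amount + (match PySem.Str.pyGet? seat 0 with
          | none => (0 : Int)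
          | some c => pvRowPrice.getD (PySem.Chars.upperChar c) 0)) := by
    funext amount seat; exact hstep amount seat
  rw [hfun, PySem.List.foldl_add]; simp
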